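-- pv_equiv track=rewrite | github.com/xmonkee/wordle | test.py | gen_outcome
-- ===== SOURCE A (Python) =====
-- def gen_outcome(word, guess):
--     outcome = [None]*5
--     checked = [False]*5
--     for i in range(5):
--         if word[i] == guess[i]:
--             outcome[i] = 'g'
--             checked[i] = True
--     for i in range(5):
--         if not outcome[i]:
--             for j in range(5):
--                 if not checked[j] and guess[i] == word[j]:
--                     outcome[i] = 'y'
--                     checked[j] = True
--                     break
--             else:
--                 outcome[i] = 'b'
--     return outcome
-- ===== SOURCE B (Python) =====
-- def gen_outcome(word, guess):
--     # Stateless formulation: no checked[] array, no consumption loop.  Position i is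
--     # yellow iff its rank among earlier non-green occurrences of guess[i] is below the
--     # number of non-green word positions holding that letter.
--     green = [word[i] == guess[i] for i in range(5)]
--     return ['g' if green[i]
--             else 'y' if sum(1 for j in range(i) if not green[j] and guess[j] == guess[i])
--                       < sum(1 for j in range(5) if not green[j] and word[j] == guess[i])
--             else 'b'
--             for i in range(5)]
-- ===== Notes on version B (the rewrite author's own statement) =====
-- stated objective: alternative
-- what changed: Replaces A's stateful consumption (mutable checked[] array updated while scanning word positions per guess letter) with a stateless closed-form rule: a non-green position is yellow iff its rank among earlier non-green occurrences of its letter in the guess is below the count of non-green positions of word holding that letter, computed independently per position with no mutation.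
import Mathlib
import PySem

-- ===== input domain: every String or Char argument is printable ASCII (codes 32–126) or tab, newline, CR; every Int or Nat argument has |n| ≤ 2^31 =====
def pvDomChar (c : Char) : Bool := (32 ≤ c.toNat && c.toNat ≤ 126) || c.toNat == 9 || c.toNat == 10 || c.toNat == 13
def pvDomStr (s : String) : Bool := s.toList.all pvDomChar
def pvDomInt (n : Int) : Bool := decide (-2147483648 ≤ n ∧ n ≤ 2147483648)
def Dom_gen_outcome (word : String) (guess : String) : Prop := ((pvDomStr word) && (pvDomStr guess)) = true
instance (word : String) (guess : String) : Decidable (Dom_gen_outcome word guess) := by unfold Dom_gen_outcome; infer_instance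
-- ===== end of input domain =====

-- B replaces A's stateful consumption (mutable checked[] array, inner scan per guess letter)
-- with a stateless closed-form rank/count rule computed independently per position.

-- ===== PORT A =====
-- Indexing: Pre_ guarantees i, j < 5 ≤ length, so `getD _ ' '` is exactly Python's word[i]/guess[i].
-- The inner 'for j in range(5): … break / else' is the first j with (not checked[j] and guess[i] == word[j]).
def pvStepA2 (w g : List Char) (st : List (Option String) × List Bool) (i : Nat) :
    List (Option String) × List Bool :=
  match st.1.getD i none with
  | some _ => st   -- 'if not outcome[i]' is False: outcome[i] is a nonempty string
  | none =>
    match (List.range 5).find? (fun j => !(st.2.getD j true) && (g.getD i ' ' == w.getD j ' ')) with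
    | some j => (st.1.set i (some "y"), st.2.set j true)
    | none => (st.1.set i (some "b"), st.2)

def gen_outcome (word : String) (guess : String) : List String :=
  let w := word.toList
  let g := guess.toList
  let st1 := (List.range 5).foldl
    (fun (st : List (Option String) × List Bool) i =>
      if w.getD i ' ' == g.getD i ' ' then (st.1.set i (some "g"), st.2.set i true) else st)
    ([none, none, none, none, none], [false, false, false, false, false])
  let st2 := (List.range 5).foldl (pvStepA2 w g) st1
  st2.1.map (fun o => o.getD "")

-- ===== PORT B =====
-- 'sum(1 for j in range(n) if cond)' is (List.range n).countP cond.
def gen_outcome_alt (word : String) (guess : String) : List String :=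
  let w := word.toList
  let g := guess.toList
  let green := (List.range 5).map (fun i => w.getD i ' ' == g.getD i ' ')
  (List.range 5).map (fun i =>
    if green.getD i false then "g"
    else if (List.range i).countP (fun j => !green.getD j false && (g.getD j ' ' == g.getD i ' '))
        < (List.range 5).countP (fun j => !green.getD j false && (w.getD j ' ' == g.getD i ' '))
    then "y" else "b")

-- ===== PRECONDITION & SPEC =====
-- A raises IndexError when either string is shorter than 5 characters; Pre_ excludes exactly those.
def Pre_gen_outcome (word : String) (guess : String) : Prop :=
  5 ≤ word.toList.length ∧ 5 ≤ guess.toList.length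
instance (word : String) (guess : String) : Decidable (Pre_gen_outcome word guess) := by
  unfold Pre_gen_outcome; infer_instance
def pvWitness_gen_outcome : String × String := ("crane", "slate")

def Spec_gen_outcome (word : String) (guess : String) (out : List String) : Prop := out = gen_outcome_alt word guess
instance (word : String) (guess : String) (out : List String) : Decidable (Spec_gen_outcome word guess out) := by unfold Spec_gen_outcome; infer_instance

-- ===== CLAIM (what is proved, stated in full; the proofs are below) =====
def Claim_equal_gen_outcome : Prop := ∀ (word : String) (guess : String), Dom_gen_outcome word guess → Pre_gen_outcome word guess → Spec_gen_outcome word guess (gen_outcome word guess)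

-- ===== LEMMAS AND PROOFS =====

def pvGreen (w g : List Char) (k : Nat) : Bool := w.getD k ' ' == g.getD k ' '

-- non-green positions of word holding letter c
def pvAvail (w g : List Char) (c : Char) : Nat :=
  (List.range 5).countP (fun j => !pvGreen w g j && (w.getD j ' ' == c))

-- non-green positions before i where the guess has letter c
def pvOcc (w g : List Char) (i : Nat) (c : Char) : Nat :=
  (List.range i).countP (fun j => !pvGreen w g j && (g.getD j ' ' == c))

def pvOutY (w g : List Char) (k : Nat) : String :=
  if pvOcc w g k (g.getD k ' ') < pvAvail w g (g.getD k ' ') then "y" else "b"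

-- A's outcome list after the second loop has processed positions [0, i)
def pvExp (w g : List Char) (i : Nat) : List (Option String) :=
  (List.range 5).map (fun k =>
    if pvGreen w g k then some "g" else if k < i then some (pvOutY w g k) else none)

-- number of still-unchecked positions of word holding letter c
def pvCnt (w : List Char) (checked : List Bool) (c : Char) : Nat :=
  (List.range 5).countP (fun j => !(checked.getD j true) && (w.getD j ' ' == c))

def pvOut0 (w g : List Char) : List (Option String) :=
  (List.range 5).map (fun i => if pvGreen w g i then some "g" else (none : Option String))

def pvChk0 (w g : List Char) : List Bool := (List.range 5).map (pvGreen w g)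

def pvInv (w g : List Char) (i : Nat) (st : List (Option String) × List Bool) : Prop :=
  st.1 = pvExp w g i ∧ st.2.length = 5 ∧
    ∀ c : Char, pvCnt w st.2 c = pvAvail w g c - min (pvOcc w g i c) (pvAvail w g c)

lemma pv_pass1 (w g : List Char) :
    (List.range 5).foldl
      (fun (st : List (Option String) × List Bool) i =>
        if w.getD i ' ' == g.getD i ' ' then (st.1.set i (some "g"), st.2.set i true) else st)
      ([none, none, none, none, none], [false, false, false, false, false])
    = (pvOut0 w g, pvChk0 w g) := by
  by_cases h0 : w[0]?.getD ' ' = g[0]?.getD ' ' <;>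
  by_cases h1 : w[1]?.getD ' ' = g[1]?.getD ' ' <;>
  by_cases h2 : w[2]?.getD ' ' = g[2]?.getD ' ' <;>
  by_cases h3 : w[3]?.getD ' ' = g[3]?.getD ' ' <;>
  by_cases h4 : w[4]?.getD ' ' = g[4]?.getD ' ' <;>
    simp [pvOut0, pvChk0, pvGreen, show List.range 5 = [0,1,2,3,4] from rfl, List.getD,
      h0, h1, h2, h3, h4]

lemma pv_countP_congr {α : Type} (l : List α) (p q : α → Bool)
    (h : ∀ a ∈ l, p a = q a) : l.countP p = l.countP q := by
  induction l with
  | nil => rfl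
  | cons a t ih =>
    simp only [List.countP_cons, h a (List.mem_cons_self ..),
      ih (fun b hb => h b (List.mem_cons_of_mem _ hb))]

lemma pv_countP_set {α : Type} (l : List α) (hl : l.Nodup) (j : α) (hj : j ∈ l)
    (p p' : α → Bool) (hpj : p j = true) (hp'j : p' j = false)
    (hag : ∀ k ∈ l, k ≠ j → p' k = p k) :
    l.countP p' + 1 = l.countP p := by
  induction l with
  | nil => cases hj
  | cons a t ih =>
    rcases List.nodup_cons.mp hl with ⟨hna, hnt⟩
    simp only [List.countP_cons]
    rcases List.mem_cons.mp hj with rfl | hjt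
    · have : t.countP p' = t.countP p := by
        apply pv_countP_congr
        intro k hk
        exact hag k (List.mem_cons_of_mem _ hk) (fun he => hna (he ▸ hk))
      simp [hpj, hp'j, this]
    · have ha : p' a = p a := hag a (List.mem_cons_self ..) (fun he => hna (he ▸ hjt))
      have := ih hnt hjt (fun k hk hkj => hag k (List.mem_cons_of_mem _ hk) hkj)
      rw [ha]
      by_cases hpa : p a = true <;> simp [hpa] at * <;> omega

lemma pv_getD_set_self (l : List Bool) (j : Nat) (hj : j < l.length) :
    (l.set j true).getD j true = true := by
  simp [List.getD, hj]

lemma pv_getD_set_ne (l : List Bool) (j k : Nat) (hk : k ≠ j) :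
    (l.set j true).getD k true = l.getD k true := by
  simp [List.getD, hk.symm]

lemma pv_exp_getD (w g : List Char) (i k : Nat) (hk : k < 5) :
    (pvExp w g i).getD k none
      = (if pvGreen w g k then some "g" else if k < i then some (pvOutY w g k) else none) := by
  simp [pvExp, List.getD, hk]

lemma pv_set_map (f : Nat → Option String) (i : Nat) (_hi : i < 5) (v : Option String) :
    ((List.range 5).map f).set i v = (List.range 5).map (fun k => if k = i then v else f k) := by
  apply List.ext_getElem
  · simp
  · intro k h1 h2
    simp only [List.length_set, List.length_map, List.length_range] at h1
    simp only [List.getElem_set, List.getElem_map, List.getElem_range]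
    by_cases h : i = k
    · simp [h]
    · simp [h, Ne.symm h]

lemma pv_occ_succ (w g : List Char) (i : Nat) (c : Char) :
    pvOcc w g (i + 1) c
      = pvOcc w g i c + (if (!pvGreen w g i && (g.getD i ' ' == c)) then 1 else 0) := by
  simp [pvOcc, List.range_succ, List.countP_append, List.countP_cons]

lemma pv_exp_succ_of_ne (w g : List Char) (i k : Nat) (hki : k ≠ i)
    (_hgk : pvGreen w g k = false) :
    (if k < i + 1 then some (pvOutY w g k) else (none : Option String))
      = (if k < i then some (pvOutY w g k) else none) := by
  by_cases hlt : k < i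
  · rw [if_pos hlt, if_pos (Nat.lt_succ_of_lt hlt)]
  · rw [if_neg hlt, if_neg (fun hlt' => hlt (Nat.lt_of_le_of_ne (Nat.lt_succ_iff.mp hlt') hki))]

lemma pv_step (w g : List Char) (i : Nat) (hi : i < 5)
    (st : List (Option String) × List Bool) (h : pvInv w g i st) :
    pvInv w g (i + 1) (pvStepA2 w g st i) := by
  obtain ⟨o, chk⟩ := st
  obtain ⟨h1, hlen, h2⟩ := h
  dsimp only at h1 hlen h2
  subst h1
  unfold pvStepA2
  dsimp only
  rw [pv_exp_getD w g i i hi]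
  by_cases hg : pvGreen w g i = true
  · -- green position: A skips it; state unchanged
    rw [if_pos hg]
    refine ⟨?_, hlen, ?_⟩
    · unfold pvExp
      apply List.map_congr_left
      intro k _
      by_cases hgk' : pvGreen w g k = false
      · simp only [hgk', Bool.false_eq_true, if_false]
        refine (pv_exp_succ_of_ne w g i k (fun he => ?_) hgk').symm
        rw [he, hg] at hgk'
        exact absurd hgk' (by simp)
      · have hgk : pvGreen w g k = true := by cases hx : pvGreen w g k; exact absurd hx hgk'; rfl
        simp [hgk]
    · intro c
      rw [h2 c, pv_occ_succ]
      simp [hg]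
  · -- non-green position: yellow iff an unchecked matching word position exists,
    -- i.e. iff pvCnt > 0, i.e. iff occ < avail
    have hg' : pvGreen w g i = false := by cases hx : pvGreen w g i; rfl; exact absurd hx hg
    rw [if_neg hg, if_neg (Nat.lt_irrefl i)]
    cases hf : (List.range 5).find? (fun j => !(chk.getD j true) && (g.getD i ' ' == w.getD j ' ')) with
    | some j =>
      have hjmem : j ∈ List.range 5 := List.mem_of_find?_eq_some hf
      have hjlt : j < chk.length := by rw [hlen]; exact List.mem_range.mp hjmem
      have hpred := List.find?_some hf
      have hchk : chk.getD j true = false := by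
        cases hck : chk.getD j true
        · rfl
        · rw [hck] at hpred; simp at hpred
      have hwj : w.getD j ' ' = g.getD i ' ' := by
        rw [hchk] at hpred; simp at hpred; exact hpred.symm
      have hcntpos : 0 < pvCnt w chk (g.getD i ' ') := by
        rw [pvCnt, List.countP_pos_iff]
        refine ⟨j, hjmem, ?_⟩
        show (!(chk.getD j true) && (w.getD j ' ' == g.getD i ' ')) = true
        rw [hchk, hwj]; simp
      have hocc : pvOcc w g i (g.getD i ' ') < pvAvail w g (g.getD i ' ') := by
        have := h2 (g.getD i ' '); omega
      refine ⟨?_, by simp [hlen], ?_⟩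
      · show (pvExp w g i).set i (some "y") = pvExp w g (i + 1)
        unfold pvExp
        rw [pv_set_map _ i hi]
        apply List.map_congr_left
        intro k _
        by_cases hki : k = i
        · subst hki
          simp only [hg', Bool.false_eq_true, if_false, Nat.lt_succ_self, if_true, pvOutY]
          rw [if_pos hocc]
        · rw [if_neg hki]
          by_cases hgk : pvGreen w g k = true
          · simp [hgk]
          · have hgk' : pvGreen w g k = false := by cases hx : pvGreen w g k; rfl; exact absurd hx hgk
            simp only [hgk', Bool.false_eq_true, if_false]
            exact (pv_exp_succ_of_ne w g i k hki hgk').symm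
      · intro c
        show pvCnt w (chk.set j true) c = _
        by_cases hcc : c = g.getD i ' '
        · have hwj' : w.getD j ' ' = c := by rw [hcc]; exact hwj
          have hdec : pvCnt w (chk.set j true) c + 1 = pvCnt w chk c := by
            apply pv_countP_set _ List.nodup_range j hjmem
            · show (!(chk.getD j true) && (w.getD j ' ' == c)) = true
              rw [hchk, hwj']; simp
            · show (!((chk.set j true).getD j true) && (w.getD j ' ' == c)) = false
              rw [pv_getD_set_self _ _ hjlt]; simp
            · intro k _ hkj
              show (!((chk.set j true).getD k true) && (w.getD k ' ' == c))
                = (!(chk.getD k true) && (w.getD k ' ' == c))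
              rw [pv_getD_set_ne _ _ _ hkj]
          have h2c := h2 c
          rw [pv_occ_succ]
          have hgi : (!pvGreen w g i && (g.getD i ' ' == c)) = true := by
            rw [hg', hcc]; simp
          rw [hgi, if_pos rfl]
          have hocc' : pvOcc w g i c < pvAvail w g c := by rw [hcc]; exact hocc
          omega
        · have hsame : pvCnt w (chk.set j true) c = pvCnt w chk c := by
            unfold pvCnt
            apply pv_countP_congr
            intro k _
            by_cases hkj : k = j
            · subst hkj
              show (!((chk.set k true).getD k true) && (w.getD k ' ' == c))
                = (!(chk.getD k true) && (w.getD k ' ' == c))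
              rw [pv_getD_set_self _ _ hjlt, hchk, hwj]
              simp only [Bool.not_true, Bool.not_false, Bool.false_and, Bool.true_and]
              symm; rw [beq_eq_false_iff_ne]
              exact fun h => hcc h.symm
            · show (!((chk.set j true).getD k true) && (w.getD k ' ' == c))
                = (!(chk.getD k true) && (w.getD k ' ' == c))
              rw [pv_getD_set_ne _ _ _ hkj]
          rw [hsame, h2 c, pv_occ_succ]
          have hgi : (!pvGreen w g i && (g.getD i ' ' == c)) = false := by
            simp only [Bool.and_eq_false_iff, beq_eq_false_iff_ne]
            exact Or.inr (fun h => hcc h.symm)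
          rw [hgi]
          simp
    | none =>
      have hcnt0 : pvCnt w chk (g.getD i ' ') = 0 := by
        rw [pvCnt, List.countP_eq_zero]
        intro j hjmem
        have hfj := List.find?_eq_none.mp hf j hjmem
        intro hp
        apply hfj
        have hchk2 : chk.getD j true = false := by
          cases hck : chk.getD j true
          · rfl
          · rw [hck] at hp; simp at hp
        rw [hchk2] at hp
        rw [hchk2]
        simp only [Bool.not_false, Bool.true_and, beq_iff_eq] at hp ⊢
        exact hp.symm
      have hocc : ¬ pvOcc w g i (g.getD i ' ') < pvAvail w g (g.getD i ' ') := by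
        have := h2 (g.getD i ' '); omega
      refine ⟨?_, hlen, ?_⟩
      · show (pvExp w g i).set i (some "b") = pvExp w g (i + 1)
        unfold pvExp
        rw [pv_set_map _ i hi]
        apply List.map_congr_left
        intro k _
        by_cases hki : k = i
        · subst hki
          simp only [hg', Bool.false_eq_true, if_false, Nat.lt_succ_self, if_true, pvOutY]
          rw [if_neg hocc]
        · rw [if_neg hki]
          by_cases hgk : pvGreen w g k = true
          · simp [hgk]
          · have hgk' : pvGreen w g k = false := by cases hx : pvGreen w g k; rfl; exact absurd hx hgk
            simp only [hgk', Bool.false_eq_true, if_false]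
            exact (pv_exp_succ_of_ne w g i k hki hgk').symm
      · intro c
        show pvCnt w chk c = _
        rw [h2 c, pv_occ_succ]
        by_cases hcc : c = g.getD i ' '
        · have hgi : (!pvGreen w g i && (g.getD i ' ' == c)) = true := by
            rw [hg', hcc]; simp
          rw [hgi, if_pos rfl]
          have hocc' : ¬ pvOcc w g i c < pvAvail w g c := by rw [hcc]; exact hocc
          omega
        · have hgi : (!pvGreen w g i && (g.getD i ' ' == c)) = false := by
            simp only [Bool.and_eq_false_iff, beq_eq_false_iff_ne]
            exact Or.inr (fun h => hcc h.symm)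
          rw [hgi]
          simp

lemma pv_fold (w g : List Char) (i : Nat) (hi : i ≤ 5) :
    pvInv w g i ((List.range i).foldl (pvStepA2 w g) (pvOut0 w g, pvChk0 w g)) := by
  induction i with
  | zero =>
    refine ⟨?_, by simp [pvChk0], ?_⟩
    · simp [pvOut0, pvExp]
    · intro c
      unfold pvCnt pvAvail pvOcc
      simp only [List.range_zero, List.countP_nil, Nat.min_def]
      rw [if_pos (Nat.zero_le _), Nat.sub_zero]
      apply pv_countP_congr
      intro j hj
      have hjlt : j < 5 := List.mem_range.mp hj
      simp [pvChk0, List.getD, hjlt]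
  | succ n ih =>
    rw [List.range_succ, List.foldl_append, List.foldl_cons, List.foldl_nil]
    exact pv_step w g n (Nat.lt_of_succ_le hi) _ (ih (Nat.le_of_succ_le hi))

lemma pv_green_getD (w g : List Char) (j : Nat) (hj : j < 5) :
    ((List.range 5).map (fun i => w.getD i ' ' == g.getD i ' ')).getD j false = pvGreen w g j := by
  simp [pvGreen, List.getD, hj]

-- ===== VERDICT (by name: the statement is the Claim_ definition above) =====
theorem gen_outcome_spec : Claim_equal_gen_outcome := by
  intro word guess _ _
  unfold Spec_gen_outcome
  simp only [gen_outcome, gen_outcome_alt]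
  rw [pv_pass1]
  have hfin := pv_fold word.toList guess.toList 5 (Nat.le_refl 5)
  obtain ⟨h1, -, -⟩ := hfin
  rw [h1]
  unfold pvExp
  rw [List.map_map]
  apply List.map_congr_left
  intro k hk
  have hk5 : k < 5 := List.mem_range.mp hk
  rw [pv_green_getD _ _ k hk5]
  by_cases hg : pvGreen word.toList guess.toList k = true
  · simp [hg]
  · have hg' : pvGreen word.toList guess.toList k = false := by
      cases hx : pvGreen word.toList guess.toList k; rfl; exact absurd hx hg
    have hcong1 : ∀ j ∈ List.range k,
        (!((List.range 5).map (fun i => word.toList.getD i ' ' == guess.toList.getD i ' ')).getD j false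
          && (guess.toList.getD j ' ' == guess.toList.getD k ' '))
        = (!pvGreen word.toList guess.toList j && (guess.toList.getD j ' ' == guess.toList.getD k ' ')) := by
      intro j hj
      rw [pv_green_getD _ _ j (Nat.lt_trans (List.mem_range.mp hj) hk5)]
    have hcong2 : ∀ j ∈ List.range 5,
        (!((List.range 5).map (fun i => word.toList.getD i ' ' == guess.toList.getD i ' ')).getD j false
          && (word.toList.getD j ' ' == guess.toList.getD k ' '))
        = (!pvGreen word.toList guess.toList j && (word.toList.getD j ' ' == guess.toList.getD k ' ')) := by
      intro j hj
      rw [pv_green_getD _ _ j (List.mem_range.mp hj)]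
    simp only [hg', Bool.false_eq_true, if_false, Function.comp]
    rw [pv_countP_congr _ _ _ hcong1, pv_countP_congr _ _ _ hcong2]
    rw [if_pos hk5]
    show _ = Option.getD (some (pvOutY word.toList guess.toList k)) ""
    unfold pvOutY pvOcc pvAvail
    by_cases hlt : (List.range k).countP (fun j => !pvGreen word.toList guess.toList j && (guess.toList.getD j ' ' == guess.toList.getD k ' '))
        < (List.range 5).countP (fun j => !pvGreen word.toList guess.toList j && (word.toList.getD j ' ' == guess.toList.getD k ' ')) <;>
      simp
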